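-- pv_equiv track=rewrite | github.com/kimhaegyeong/LawFirmAI | lawfirm_langgraph/core/processing/integration/term_integration_system.py | select_representative
-- ===== SOURCE A (Python) =====
-- from typing import List, Dict, Any, Tuple, Optional
--
-- def select_representative(term_group: List[str]) -> str:
--     """대표 용어 선택"""
--     if not term_group:
--         return ""
--
--     if len(term_group) == 1:
--         return term_group[0]
--
--     # 가장 짧고 일반적인 용어 선택
--     # 우선순위: 길이, 빈도, 사전 순
--     term_scores = []
--     for term in term_group:
--         score = (
--             -len(term),  # 길이가 짧을수록 좋음
--             -term_group.count(term),  # 빈도가 높을수록 좋음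
--             term  # 사전 순
--         )
--         term_scores.append((score, term))
--
--     term_scores.sort()
--     return term_scores[0][1]
-- ===== SOURCE B (Python) =====
-- def select_representative(term_group):
--     """대표 용어 선택 — staged narrowing instead of build-score-list-then-sort."""
--     if not term_group:
--         return ""
--     if len(term_group) == 1:
--         return term_group[0]
--     # Stage 1: keep the longest terms (A's tuple sorts -len ascending => longest first).
--     longest = max(len(t) for t in term_group)
--     cands = [t for t in term_group if len(t) == longest]
--     # Stage 2: among those, keep the most frequent ones.
--     best = max(term_group.count(t) for t in cands)
--     # Stage 3: lexicographically smallest of the survivors.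
--     return min(t for t in cands if term_group.count(t) == best)
-- ===== Notes on version B (the rewrite author's own statement) =====
-- stated objective: faster
-- what changed: Replaces building a scored copy of the list (with a count per element) and fully sorting it with a three-stage narrowing: max length over the group, then max frequency among the longest terms only, then lexicographic min of the survivors (no sort, counts only for the few candidates).
import Mathlib
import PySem

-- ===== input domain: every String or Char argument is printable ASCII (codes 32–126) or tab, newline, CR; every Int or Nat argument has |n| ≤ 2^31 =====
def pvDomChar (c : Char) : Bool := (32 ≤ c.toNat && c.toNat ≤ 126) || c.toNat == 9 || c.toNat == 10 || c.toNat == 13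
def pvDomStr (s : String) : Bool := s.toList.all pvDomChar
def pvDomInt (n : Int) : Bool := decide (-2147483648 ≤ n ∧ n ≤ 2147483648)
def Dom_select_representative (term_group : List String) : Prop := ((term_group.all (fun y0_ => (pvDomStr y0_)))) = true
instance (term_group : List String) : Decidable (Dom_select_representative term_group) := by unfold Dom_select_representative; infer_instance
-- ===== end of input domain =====

-- B replaces A's build-score-list-then-sort with a three-stage narrowing (max length, then max frequency, then lexicographic min); same result, no sort.


-- ===== PORT A =====
-- Python's comparison of ((i1,i2,s1), s2) tuples is lexicographic on the four components;
-- it is ported exactly as the Lex order on Int ×ₗ Int ×ₗ String ×ₗ String (used as sort key).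
def pvKeyA (p : (Int × Int × String) × String) : Lex (Int × Lex (Int × Lex (String × String))) :=
  toLex (p.1.1, toLex (p.1.2.1, toLex (p.1.2.2, p.2)))

def select_representative (term_group : List String) : String :=
  if term_group = [] then ""
  else if term_group.length = 1 then (PySem.List.pyGet? term_group 0).getD ""
  else
    -- term_scores.append((score, term)) for each term
    let term_scores := term_group.foldl
      (fun acc term =>
        acc ++ [((-(PySem.Str.len term), -((PySem.List.count term_group term : Int)), term), term)]) []
    -- term_scores.sort(); return term_scores[0][1]
    let sortedScores := PySem.List.sorted term_scores pvKeyA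
    ((PySem.List.pyGet? sortedScores 0).map (fun p => p.2)).getD ""

-- ===== PORT B =====
def select_representative_alt (term_group : List String) : String :=
  if term_group = [] then ""
  else if term_group.length = 1 then (PySem.List.pyGet? term_group 0).getD ""
  else
    let longest := (PySem.List.max? (term_group.map PySem.Str.len) (fun x => x)).getD 0
    let cands := term_group.filter (fun t => PySem.Str.len t == longest)
    let best := (PySem.List.max? (cands.map (fun t => (PySem.List.count term_group t : Int))) (fun x => x)).getD 0
    (PySem.List.min? (cands.filter (fun t => (PySem.List.count term_group t : Int) == best)) (fun t => t)).getD ""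

-- ===== PRECONDITION & SPEC =====
def Spec_select_representative (term_group : List String) (out : String) : Prop := out = select_representative_alt term_group
instance (term_group : List String) (out : String) : Decidable (Spec_select_representative term_group out) := by unfold Spec_select_representative; infer_instance

-- ===== CLAIM (what is proved, stated in full; the proofs are below) =====
def Claim_equal_select_representative : Prop := ∀ (term_group : List String), Dom_select_representative term_group → Spec_select_representative term_group (select_representative term_group)

-- ===== LEMMAS AND PROOFS =====


-- The per-term sort key of A, seen through the score tuple.
def pvK (tg : List String) (t : String) : Lex (Int × Lex (Int × Lex (String × String))) :=
  toLex (-(PySem.Str.len t), toLex (-((PySem.List.count tg t : Int)), toLex (t, t)))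

theorem pvK_inj {tg : List String} {a b : String} (h : pvK tg a = pvK tg b) : a = b := by
  unfold pvK at h
  have := congrArg (fun x => (ofLex (ofLex (ofLex x).2).2).1) h
  simpa using this

-- pvK-minimality from the three staged facts (length, then frequency, then the string itself).
theorem pvK_le_of (tg : List String) (r t : String)
    (hlen : PySem.Str.len t ≤ PySem.Str.len r)
    (hcnt : PySem.Str.len t = PySem.Str.len r → PySem.List.count tg t ≤ PySem.List.count tg r)
    (hstr : PySem.Str.len t = PySem.Str.len r → PySem.List.count tg t = PySem.List.count tg r → r ≤ t) :
    pvK tg r ≤ pvK tg t := by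
  unfold pvK
  rw [Prod.Lex.le_iff]; simp only [ofLex_toLex]
  rcases (neg_le_neg hlen).lt_or_eq with h | h
  · exact Or.inl h
  · refine Or.inr ⟨h, ?_⟩
    have hle : PySem.Str.len t = PySem.Str.len r := by omega
    rw [Prod.Lex.le_iff]; simp only [ofLex_toLex]
    have h2 : -((PySem.List.count tg r : Int)) ≤ -((PySem.List.count tg t : Int)) := by
      have := hcnt hle; omega
    rcases h2.lt_or_eq with h2 | h2
    · exact Or.inl h2
    · refine Or.inr ⟨h2, ?_⟩
      have hc : PySem.List.count tg t = PySem.List.count tg r := by omega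
      rw [Prod.Lex.le_iff]; simp only [ofLex_toLex]
      rcases (hstr hle hc).lt_or_eq with h3 | h3
      · exact Or.inl h3
      · exact Or.inr ⟨h3, le_of_eq h3⟩

-- B's result is a member of tg minimizing pvK.
theorem pvB_min (tg : List String) (h0 : tg ≠ []) (h1 : tg.length ≠ 1) :
    select_representative_alt tg ∈ tg ∧
    ∀ t ∈ tg, pvK tg (select_representative_alt tg) ≤ pvK tg t := by
  obtain ⟨L, hL⟩ : ∃ L, PySem.List.max? (tg.map PySem.Str.len) (fun x => x) = some L := by
    cases hmx : PySem.List.max? (tg.map PySem.Str.len) (fun x => x) with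
    | none => exact absurd ((PySem.List.max?_eq_none_iff _ _).mp hmx) (by simp [h0])
    | some L => exact ⟨L, rfl⟩
  have hLmax : ∀ t ∈ tg, PySem.Str.len t ≤ L := by
    intro t ht
    exact PySem.List.max?_isMax hL _ (List.mem_map_of_mem ht)
  set cands := tg.filter (fun t => PySem.Str.len t == L) with hcands
  have hcne : cands ≠ [] := by
    obtain ⟨x, hx, hxL⟩ := List.mem_map.mp (PySem.List.max?_mem hL)
    have : x ∈ cands := List.mem_filter.mpr ⟨hx, by simp only [beq_iff_eq]; exact hxL⟩
    exact List.ne_nil_of_mem this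
  obtain ⟨B, hB⟩ : ∃ B, PySem.List.max? (cands.map (fun t => (PySem.List.count tg t : Int))) (fun x => x) = some B := by
    cases hmx : PySem.List.max? (cands.map (fun t => (PySem.List.count tg t : Int))) (fun x => x) with
    | none => exact absurd ((PySem.List.max?_eq_none_iff _ _).mp hmx) (by simp [hcne])
    | some B => exact ⟨B, rfl⟩
  have hBmax : ∀ t ∈ cands, (PySem.List.count tg t : Int) ≤ B := by
    intro t ht
    exact PySem.List.max?_isMax hB _ (List.mem_map_of_mem ht)
  set fin := cands.filter (fun t => (PySem.List.count tg t : Int) == B) with hfin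
  have hfne : fin ≠ [] := by
    obtain ⟨c, hc, hcB⟩ := List.mem_map.mp (PySem.List.max?_mem hB)
    have : c ∈ fin := List.mem_filter.mpr ⟨hc, by simp only [beq_iff_eq]; exact hcB⟩
    exact List.ne_nil_of_mem this
  obtain ⟨r, hr⟩ : ∃ r, PySem.List.min? fin (fun t => t) = some r := by
    cases hmx : PySem.List.min? fin (fun t => t) with
    | none => exact absurd ((PySem.List.min?_eq_none_iff _ _).mp hmx) hfne
    | some r => exact ⟨r, rfl⟩
  have halt : select_representative_alt tg = r := by
    simp only [select_representative_alt, if_neg h0, if_neg h1, hL, ← hcands, hB, ← hfin, hr,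
      Option.getD_some]
  have hrfin : r ∈ fin := PySem.List.min?_mem hr
  have hrcands : r ∈ cands := (List.mem_filter.mp hrfin).1
  have hrtg : r ∈ tg := (List.mem_filter.mp hrcands).1
  have hrL : PySem.Str.len r = L := by
    have := (List.mem_filter.mp hrcands).2; simpa using this
  have hrB : (PySem.List.count tg r : Int) = B := by
    have := (List.mem_filter.mp hrfin).2; simpa using this
  rw [halt]
  refine ⟨hrtg, ?_⟩
  intro t ht
  refine pvK_le_of tg r t (by rw [hrL]; exact hLmax t ht) ?_ ?_
  · intro hlen
    have htc : t ∈ cands := List.mem_filter.mpr ⟨ht, by simp only [beq_iff_eq, hlen]; exact hrL⟩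
    have hb := hBmax t htc
    omega
  · intro hlen hcnt
    have htc : t ∈ cands := List.mem_filter.mpr ⟨ht, by simp only [beq_iff_eq, hlen]; exact hrL⟩
    have htf : t ∈ fin := List.mem_filter.mpr ⟨htc, by simp only [beq_iff_eq, hcnt]; exact hrB⟩
    exact PySem.List.min?_isMin hr _ htf

-- A's result is a member of tg minimizing pvK.
theorem pvA_min (tg : List String) (h0 : tg ≠ []) (h1 : tg.length ≠ 1) :
    select_representative tg ∈ tg ∧
    ∀ t ∈ tg, pvK tg (select_representative tg) ≤ pvK tg t := by
  have hmapne : tg.map (fun term => ((-(PySem.Str.len term), -((PySem.List.count tg term : Int)), term), term)) ≠ [] := by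
    simp [h0]
  obtain ⟨m, rest, hms⟩ : ∃ m rest,
      PySem.List.sorted (tg.map (fun term => ((-(PySem.Str.len term), -((PySem.List.count tg term : Int)), term), term))) pvKeyA = m :: rest := by
    cases hs : PySem.List.sorted (tg.map (fun term => ((-(PySem.Str.len term), -((PySem.List.count tg term : Int)), term), term))) pvKeyA with
    | nil => exact absurd ((PySem.List.sorted_eq_nil_iff _ _ _).mp hs) hmapne
    | cons m rest => exact ⟨m, rest, rfl⟩
  have hA : select_representative tg = m.2 := by
    simp only [select_representative, if_neg h0, if_neg h1,
      PySem.List.foldl_append_singleton_eq_map, List.nil_append, hms]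
    simp [PySem.List.pyGet?, PySem.List.pyIdx?]
  have hm : m ∈ tg.map (fun term => ((-(PySem.Str.len term), -((PySem.List.count tg term : Int)), term), term)) := by
    rw [← PySem.List.mem_sorted _ pvKeyA false, hms]; exact List.mem_cons_self
  obtain ⟨tm, htm, hfm⟩ := List.mem_map.mp hm
  have hmin := PySem.List.key_head_sorted_le _ pvKeyA hms
  have hm2 : m.2 = tm := by rw [← hfm]
  rw [hA, hm2]
  refine ⟨htm, ?_⟩
  intro t ht
  have h1' := hmin _ (List.mem_map_of_mem (f := fun term => ((-(PySem.Str.len term), -((PySem.List.count tg term : Int)), term), term)) ht)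
  have hk : pvKeyA m = pvK tg tm := by rw [← hfm]; rfl
  rw [← hk]
  exact h1'

-- ===== VERDICT (by name: the statement is the Claim_ definition above) =====
theorem select_representative_spec : Claim_equal_select_representative := by
  intro tg _
  unfold Spec_select_representative
  by_cases h0 : tg = []
  · simp [select_representative, select_representative_alt, h0]
  · by_cases h1 : tg.length = 1
    · simp [select_representative, select_representative_alt, h0, h1]
    · obtain ⟨hAmem, hAmin⟩ := pvA_min tg h0 h1
      obtain ⟨hBmem, hBmin⟩ := pvB_min tg h0 h1
      exact pvK_inj (le_antisymm (hAmin _ hBmem) (hBmin _ hAmem))
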